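-- pv_equiv track=rewrite | github.com/trevor-gahl/fm_index | fm_index.py | calc_first_occ
-- ===== SOURCE A (Python) =====
-- def calc_first_occ(s):
--     """ calculate the first occurance of a letter in sorted string s """
--     # s - is the bwt transformed string
--     A = {} # letter count
--     for i, c in enumerate(s):
--         if A.get(c):
--             A[c] += 1
--         else:
--             A[c] = 1
--
--     # sort the letters
--     letters = sorted(A.keys())
--
--     # first index of letter
--     occ = {}
--
--     index = 0
--     for c in letters:
--         occ[c] = index
--         index += A[c]
--     del index, A
--
--     return occ
-- ===== SOURCE B (Python) =====
-- def calc_first_occ(s):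
--     """ calculate the first occurance of a letter in sorted string s """
--     occ = {}
--     for i, c in enumerate(sorted(s)):
--         if c not in occ:
--             occ[c] = i
--     return occ
-- ===== Notes on version B (the rewrite author's own statement) =====
-- stated objective: simpler
-- what changed: B drops A's count dictionary and prefix-sum loop: it sorts the string once and records each character's first index while walking the sorted sequence with enumerate.
import Mathlib
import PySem

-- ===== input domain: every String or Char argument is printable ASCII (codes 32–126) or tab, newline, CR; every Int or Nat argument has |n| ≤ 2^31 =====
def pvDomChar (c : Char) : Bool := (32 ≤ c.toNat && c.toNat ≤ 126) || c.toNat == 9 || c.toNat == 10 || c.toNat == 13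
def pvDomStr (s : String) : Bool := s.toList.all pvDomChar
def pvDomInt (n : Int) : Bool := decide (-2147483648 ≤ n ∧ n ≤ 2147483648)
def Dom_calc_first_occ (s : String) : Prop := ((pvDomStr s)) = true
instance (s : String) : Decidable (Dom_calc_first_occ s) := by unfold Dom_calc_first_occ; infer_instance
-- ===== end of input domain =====

-- B replaces A's letter-count dictionary and prefix-sum loop by a single first-occurrence
-- scan of the sorted character sequence (objective: simpler).

-- ===== PORT A =====
def calc_first_occ (s : String) : List (String × Int) :=
  let chars : List String := s.toList.map (fun c => String.ofList [c])  -- iterating a Python str yields length-1 strings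
  -- for i, c in enumerate(s): if A.get(c): A[c] += 1 else: A[c] = 1
  let A : PySem.Dict String Int :=
    (PySem.List.enumerate chars).foldl (fun d p =>
      match PySem.Dict.get? d p.2 with
      | some v => if v ≠ 0 then d.insert p.2 (v + 1) else d.insert p.2 1  -- truthiness of A.get(c)
      | none => d.insert p.2 1) PySem.Dict.empty
  let letters := PySem.List.sorted A.keys (fun x => x) false
  -- occ loop; A[c] ported as getD: c is a key of A, so KeyError is unreachable
  let st := letters.foldl (fun (p : PySem.Dict String Int × Int) c =>
      (p.1.insert c p.2, p.2 + A.getD c 0)) (PySem.Dict.empty, 0)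
  st.1.items

-- ===== PORT B =====
def calc_first_occ_alt (s : String) : List (String × Int) :=
  let t := PySem.List.sorted (s.toList.map (fun c => String.ofList [c])) (fun x => x) false
  ((PySem.List.enumerate t).foldl (fun (occ : PySem.Dict String Int) p =>
      if occ.contains p.2 then occ else occ.insert p.2 p.1) PySem.Dict.empty).items

-- ===== PRECONDITION & SPEC =====
def Spec_calc_first_occ (s : String) (out : List (String × Int)) : Prop := out = calc_first_occ_alt s
instance (s : String) (out : List (String × Int)) : Decidable (Spec_calc_first_occ s out) := by unfold Spec_calc_first_occ; infer_instance

-- ===== CLAIM (what is proved, stated in full; the proofs are below) =====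
def Claim_equal_calc_first_occ : Prop := ∀ (s : String), Dom_calc_first_occ s → Spec_calc_first_occ s (calc_first_occ s)

-- ===== LEMMAS AND PROOFS =====

/-- Canonical result: letters in the given order paired with running prefix sums of `f`. -/
def pvG (ls : List String) (f : String → Int) (i : Int) : List (String × Int) :=
  match ls with
  | [] => []
  | c :: cs => (c, i) :: pvG cs f (i + f c)

theorem pvG_congr (ls : List String) (f f' : String → Int) (i : Int)
    (h : ∀ c ∈ ls, f c = f' c) : pvG ls f i = pvG ls f' i := by
  induction ls generalizing i with
  | nil => rfl
  | cons c cs ih =>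
      simp only [pvG, h c (by simp)]
      exact congrArg _ (ih _ (fun x hx => h x (by simp [hx])))

theorem foldl_enumerate_snd {α β : Type} (g : β → α → β) :
    ∀ (l : List α) (k : Int) (init : β),
      (PySem.List.enumerate l k).foldl (fun d p => g d p.2) init = l.foldl g init := by
  intro l
  induction l with
  | nil => intro k init; simp [PySem.List.enumerate_nil]
  | cons x xs ih => intro k init; simp [PySem.List.enumerate_cons, ih]

/-- A's counting loop builds `counter chars`. -/
theorem countA_eq_counter (chars : List String) :
    (PySem.List.enumerate chars).foldl (fun d p =>
      match PySem.Dict.get? d p.2 with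
      | some v => if v ≠ 0 then d.insert p.2 (v + 1) else d.insert p.2 (1 : Int)
      | none => d.insert p.2 1) PySem.Dict.empty = PySem.Dict.counter chars := by
  have hstep : (fun (d : PySem.Dict String Int) (p : Int × String) =>
      match PySem.Dict.get? d p.2 with
      | some v => if v ≠ 0 then d.insert p.2 (v + 1) else d.insert p.2 (1 : Int)
      | none => d.insert p.2 1)
      = fun d p => d.insert p.2 (d.getD p.2 0 + 1) := by
    funext d p
    rcases h : PySem.Dict.get? d p.2 with _ | v
    · simp [PySem.Dict.getD, h]
    · by_cases hv : v = 0 <;> simp [PySem.Dict.getD, h, hv]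
  rw [hstep]
  exact (foldl_enumerate_snd (fun (d : PySem.Dict String Int) c => d.insert c (d.getD c 0 + 1)) chars 0 _).trans
    (PySem.Dict.foldl_insert_getD_add_one_eq_counter chars)

/-- A's prefix-sum loop over fresh distinct keys appends `pvG` to the items. -/
theorem foldA_items (f : String → Int) (A : PySem.Dict String Int)
    (hf : ∀ c, A.getD c 0 = f c) :
    ∀ (ls : List String), ls.Nodup →
    ∀ (d : PySem.Dict String Int) (i : Int), (∀ c ∈ ls, d.contains c = false) →
      ((ls.foldl (fun (p : PySem.Dict String Int × Int) c =>
          (p.1.insert c p.2, p.2 + A.getD c 0)) (d, i)).1).items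
        = d.items ++ pvG ls f i := by
  intro ls
  induction ls with
  | nil => intro _ d i _; simp [pvG]
  | cons c cs ih =>
      intro hnd d i hdisj
      simp only [List.foldl_cons]
      rw [ih hnd.of_cons (d.insert c i) (i + A.getD c 0) ?_]
      · simp [PySem.Dict.items_insert, hdisj c (by simp), hf c, pvG]
      · intro c' hc'
        rw [PySem.Dict.contains_insert]
        have : c' ≠ c := by
          rintro rfl; exact (List.nodup_cons.mp hnd).1 hc'
        simp [this, hdisj c' (by simp [hc'])]

/-- A `≤`-sorted list is an initial run of copies of its head followed by strictly larger elements. -/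
theorem run_decomp (m : String) (ts : List String)
    (hp : (m :: ts).Pairwise (· ≤ ·)) :
    ∃ a r, m :: ts = List.replicate a m ++ r ∧ 1 ≤ a ∧ (m :: ts).count m = a ∧
      (∀ c ∈ r, m < c) ∧ r.Pairwise (· ≤ ·) := by
  set t := m :: ts with ht
  set tw := t.takeWhile (fun x => x == m) with htw
  set r := t.dropWhile (fun x => x == m) with hr
  have hsplit : t = tw ++ r := (List.takeWhile_append_dropWhile).symm
  have htwrep : tw = List.replicate tw.length m := by
    apply List.eq_replicate_of_mem
    intro b hb
    have := List.mem_takeWhile_imp hb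
    simpa using this
  have ha : 1 ≤ tw.length := by
    rw [htw, ht]
    simp [List.takeWhile]
  have hge : ∀ c ∈ ts, m ≤ c := fun c hc => (List.pairwise_cons.mp hp).1 c hc
  have hrlt : ∀ c ∈ r, m < c := by
    intro c hc
    rcases hhead : r with _ | ⟨h0, rtl⟩
    · simp [hhead] at hc
    · have hh0 : ¬ (h0 == m) = true := by
        have := List.head?_dropWhile_not (fun x => x == m) t
        rw [← hr, hhead] at this
        simpa using this
      have hh0ne : h0 ≠ m := by simpa using hh0
      have hh0mem : h0 ∈ t := List.dropWhile_subset _ (by rw [← hr, hhead]; exact List.mem_cons_self)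
      have hh0le : m ≤ h0 := by
        rcases List.mem_cons.mp hh0mem with h | h
        · exact absurd h hh0ne
        · exact hge h0 h
      have hmh0 : m < h0 := lt_of_le_of_ne hh0le (Ne.symm hh0ne)
      have hrp : r.Pairwise (· ≤ ·) := hp.sublist (List.dropWhile_sublist _)
      rcases List.mem_cons.mp (hhead ▸ hc) with h | h
      · exact h ▸ hmh0
      · have : h0 ≤ c := (List.pairwise_cons.mp (hhead ▸ hrp)).1 c h
        exact lt_of_lt_of_le hmh0 this
  have hrp : r.Pairwise (· ≤ ·) := hp.sublist (List.dropWhile_sublist _)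
  refine ⟨tw.length, r, ?_, ha, ?_, hrlt, hrp⟩
  · rw [← htwrep]; exact hsplit
  · rw [hsplit, List.count_append]
    have h1 : tw.count m = tw.length := by
      rw [htwrep]; simp
    have h2 : r.count m = 0 := by
      rw [List.count_eq_zero]
      intro hm
      exact absurd rfl (ne_of_gt (hrlt m hm))
    omega

/-- `sorted(set(replicate a m ++ r))` puts `m` first when everything in `r` is larger. -/
theorem sorted_ofList_run (m : String) (a : Nat) (ha : 1 ≤ a) (r : List String)
    (h : ∀ c ∈ r, m < c) :
    PySem.List.sorted (PySem.Set.ofList (List.replicate a m ++ r)) (fun x => x) false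
      = m :: PySem.List.sorted (PySem.Set.ofList r) (fun x => x) false := by
  apply PySem.List.sorted_eq_of_perm_of_pairwise_lt
  · apply List.perm_of_nodup_nodup_toFinset_eq
    · refine List.nodup_cons.mpr ⟨?_, ?_⟩
      · intro hm
        have : m ∈ PySem.Set.ofList r := (PySem.List.mem_sorted _ _ _ _).mp hm
        have : m ∈ r := (PySem.Set.mem_ofList _ _).mp this
        exact absurd rfl (ne_of_gt (h m this))
      · exact ((PySem.List.sorted_perm _ _ _).nodup_iff).mpr (PySem.Set.nodup_ofList r)
    · exact PySem.Set.nodup_ofList _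
    · ext x
      simp only [List.toFinset_cons, Finset.mem_insert, List.mem_toFinset,
        PySem.List.mem_sorted, PySem.Set.mem_ofList, List.mem_append, List.mem_replicate]
      constructor
      · rintro (rfl | hx)
        · left; exact ⟨by omega, rfl⟩
        · right; exact hx
      · rintro (⟨-, rfl⟩ | hx)
        · left; rfl
        · right; exact hx
  · refine List.pairwise_cons.mpr ⟨?_, ?_⟩
    · intro c hc
      exact h c ((PySem.Set.mem_ofList _ _).mp ((PySem.List.mem_sorted _ _ _ _).mp hc))
    · exact PySem.List.sorted_ofList_pairwise_lt (xs := r)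

theorem fold_rep_in (m : String) :
    ∀ (n : Nat) (d : PySem.Dict String Int) (k : Int), d.contains m = true →
      (PySem.List.enumerate (List.replicate n m) k).foldl (fun occ p =>
        if occ.contains p.2 then occ else occ.insert p.2 p.1) d = d := by
  intro n
  induction n with
  | zero => intro d k _; simp [PySem.List.enumerate_nil]
  | succ n ih =>
      intro d k hd
      rw [List.replicate_succ, PySem.List.enumerate_cons, List.foldl_cons]
      simp only [hd, if_true]
      exact ih d (k + 1) hd

theorem fold_rep (m : String) :
    ∀ (n : Nat), 1 ≤ n → ∀ (d : PySem.Dict String Int) (k : Int), d.contains m = false →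
      (PySem.List.enumerate (List.replicate n m) k).foldl (fun occ p =>
        if occ.contains p.2 then occ else occ.insert p.2 p.1) d = d.insert m k := by
  intro n hn d k hd
  obtain ⟨n', rfl⟩ : ∃ n', n = n' + 1 := ⟨n - 1, by omega⟩
  rw [List.replicate_succ, PySem.List.enumerate_cons, List.foldl_cons]
  simp only [hd]
  exact fold_rep_in m n' _ (k + 1) (PySem.Dict.contains_insert_self _ _ _)

/-- B's first-occurrence scan of a `≤`-sorted list yields `pvG` over the sorted distinct letters. -/
theorem foldB_items :
    ∀ (n : Nat) (t : List String), t.length ≤ n → t.Pairwise (· ≤ ·) →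
     ∀ (d : PySem.Dict String Int) (k : Int), (∀ c ∈ t, d.contains c = false) →
      ((PySem.List.enumerate t k).foldl (fun occ p =>
          if occ.contains p.2 then occ else occ.insert p.2 p.1) d).items
        = d.items ++ pvG (PySem.List.sorted (PySem.Set.ofList t) (fun x => x) false)
            (fun c => (t.count c : Int)) k := by
  intro n
  induction n with
  | zero =>
      intro t hlen _ d k _
      have : t = [] := List.length_eq_zero_iff.mp (Nat.le_zero.mp hlen)
      subst this
      simp [PySem.List.enumerate_nil, PySem.Set.ofList, pvG, PySem.List.sorted]
  | succ n ih =>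
      intro t hlen hp d k hdisj
      rcases t with _ | ⟨m, ts⟩
      · simp [PySem.List.enumerate_nil, PySem.Set.ofList, pvG, PySem.List.sorted]
      obtain ⟨a, r, hsplit, ha, hcount, hrlt, hrp⟩ := run_decomp m ts hp
      rw [hsplit, PySem.List.enumerate_append, List.foldl_append]
      rw [fold_rep m a ha d k (hdisj m (by simp))]
      have hdisj' : ∀ c ∈ r, (d.insert m k).contains c = false := by
        intro c hc
        rw [PySem.Dict.contains_insert]
        have hne : c ≠ m := (ne_of_gt (hrlt c hc))
        simp [hne, hdisj c (by rw [hsplit]; exact List.mem_append_right _ hc)]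
      have hrlen : r.length ≤ n := by
        have h1 : ts.length + 1 = a + r.length := by
          simpa [List.length_replicate] using congrArg List.length hsplit
        have h2 : ts.length + 1 ≤ n + 1 := by simpa using hlen
        omega
      rw [List.length_replicate, ih r hrlen hrp (d.insert m k) (k + a) hdisj']
      rw [PySem.Dict.items_insert, hdisj m (by simp)]
      rw [sorted_ofList_run m a ha r hrlt]
      simp only [pvG]
      rw [if_neg (by simp)]
      rw [List.append_assoc, List.singleton_append]
      have h0 : r.count m = 0 := by
        rw [List.count_eq_zero]; intro hm; exact absurd rfl (ne_of_gt (hrlt m hm))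
      have hcm : (List.replicate a m ++ r).count m = a := by
        simp [List.count_append, h0]
      rw [hcm]
      refine congrArg (fun l => d.items ++ (((m : String), k) :: l)) ?_
      apply pvG_congr
      intro c hc
      have hcr : c ∈ r := (PySem.Set.mem_ofList _ _).mp ((PySem.List.mem_sorted _ _ _ _).mp hc)
      have hne : c ≠ m := ne_of_gt (hrlt c hcr)
      simp [List.count_append, List.count_replicate, Ne.symm hne]

-- ===== VERDICT (by name: the statement is the Claim_ definition above) =====
theorem calc_first_occ_spec : Claim_equal_calc_first_occ := by
  intro s _
  unfold Spec_calc_first_occ calc_first_occ calc_first_occ_alt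
  dsimp only
  rw [countA_eq_counter]
  set chars : List String := s.toList.map (fun c => String.ofList [c]) with hchars
  set t := PySem.List.sorted chars (fun x => x) false with htdef
  -- A side
  rw [PySem.Dict.keys_counter]
  have hA : ((PySem.List.sorted (PySem.Set.ofList chars) (fun x => x) false).foldl
      (fun (p : PySem.Dict String Int × Int) c =>
        (p.1.insert c p.2, p.2 + (PySem.Dict.counter chars).getD c 0)) (PySem.Dict.empty, 0)).1.items
      = pvG (PySem.List.sorted (PySem.Set.ofList chars) (fun x => x) false)
          (fun c => (chars.count c : Int)) 0 := by
    rw [foldA_items (fun c => (chars.count c : Int)) (PySem.Dict.counter chars)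
      (fun c => PySem.Dict.getD_counter chars c)
      _ (((PySem.List.sorted_perm _ _ _).nodup_iff).mpr (PySem.Set.nodup_ofList chars))
      PySem.Dict.empty 0 (fun c _ => PySem.Dict.contains_empty c)]
    simp [PySem.Dict.empty]
  rw [hA]
  -- B side
  have hB := foldB_items t.length t le_rfl
    (PySem.List.sorted_pairwise chars (fun x => x)) PySem.Dict.empty 0
    (fun c _ => PySem.Dict.contains_empty c)
  rw [hB]
  simp only [PySem.Dict.empty, List.nil_append]
  -- bridge: sorted set of chars = sorted set of sorted chars; counts agree
  have hperm : t.Perm chars := PySem.List.sorted_perm _ _ _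
  have hsetperm : (PySem.Set.ofList t).Perm (PySem.Set.ofList chars) := by
    apply List.perm_of_nodup_nodup_toFinset_eq (PySem.Set.nodup_ofList _) (PySem.Set.nodup_ofList _)
    ext x
    simp only [List.mem_toFinset, PySem.Set.mem_ofList]
    exact ⟨fun h => hperm.mem_iff.mp h, fun h => hperm.mem_iff.mpr h⟩
  rw [PySem.List.sorted_eq_sorted_of_perm _ _ _ (fun a b h => h) hsetperm]
  apply pvG_congr
  intro c _
  exact congrArg _ (hperm.count_eq c).symm
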